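-- pv_equiv track=rewrite | github.com/ranihorev/scihive-backend | routes/acronym_extractor.py | get_long_form_candidate
-- ===== SOURCE A (Python) =====
-- MAX_WORDS_DISTANCE = 10
--
-- def get_long_form_candidate(tokens, end_pos, short_form):
--     long_form_candidate = tokens[max(end_pos - MAX_WORDS_DISTANCE, 0):end_pos]
--     long_form_candidate_lower = [w.lower() for w in long_form_candidate]
--     short_form_lower = short_form.lower()
--
--     if short_form_lower not in long_form_candidate_lower:
--         return long_form_candidate
--
--     start_pos = len(long_form_candidate_lower) - long_form_candidate_lower[::-1].index(short_form_lower)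
--     return long_form_candidate[start_pos:]
-- ===== SOURCE B (Python) =====
-- MAX_WORDS_DISTANCE = 10
--
-- def get_long_form_candidate(tokens, end_pos, short_form):
--     target = short_form.lower()
--     acc = []
--     for tok in tokens[max(end_pos - MAX_WORDS_DISTANCE, 0):end_pos]:
--         if tok.lower() == target:
--             acc = []
--         else:
--             acc.append(tok)
--     return acc
-- ===== Notes on version B (the rewrite author's own statement) =====
-- stated objective: alternative
-- what changed: Replaces the find-the-last-occurrence-then-slice strategy (lowercased copy, membership test, reversed .index, slicing) with a forward single pass that accumulates tokens and resets the accumulator to empty whenever it meets a case-insensitive match, so the accumulator at the end is exactly the tokens after the last match (or the whole window if none).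
import Mathlib
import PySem

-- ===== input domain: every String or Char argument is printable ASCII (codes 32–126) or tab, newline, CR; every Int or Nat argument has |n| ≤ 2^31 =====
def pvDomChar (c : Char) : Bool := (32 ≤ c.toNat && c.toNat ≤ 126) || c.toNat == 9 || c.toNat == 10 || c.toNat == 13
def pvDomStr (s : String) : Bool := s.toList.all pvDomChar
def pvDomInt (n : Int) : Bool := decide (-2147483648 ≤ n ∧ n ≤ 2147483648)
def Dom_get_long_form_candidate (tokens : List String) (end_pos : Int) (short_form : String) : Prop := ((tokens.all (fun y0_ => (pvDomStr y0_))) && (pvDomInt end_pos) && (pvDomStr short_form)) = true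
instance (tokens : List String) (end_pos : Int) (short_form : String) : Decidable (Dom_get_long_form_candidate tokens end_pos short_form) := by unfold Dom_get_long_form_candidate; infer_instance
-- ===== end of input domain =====

-- B replaces A's find-the-last-occurrence-then-slice strategy with one forward pass that
-- accumulates tokens and resets the accumulator on every case-insensitive match (alternative
-- decomposition, same result).

-- ===== PORT A =====
def get_long_form_candidate (tokens : List String) (end_pos : Int) (short_form : String) : List String :=
  let long_form_candidate := PySem.List.slice tokens (some (max (end_pos - 10) 0)) (some end_pos)
  let long_form_candidate_lower := long_form_candidate.map PySem.Str.lower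
  let short_form_lower := PySem.Str.lower short_form
  if short_form_lower ∈ long_form_candidate_lower then
    -- `.index` on the reversed list; the membership guard makes it succeed (none is unreachable)
    match PySem.List.index? long_form_candidate_lower.reverse short_form_lower with
    | some k => PySem.List.slice long_form_candidate
        (some ((long_form_candidate_lower.length : Int) - (k : Int))) none
    | none => long_form_candidate
  else
    long_form_candidate

-- ===== PORT B =====
-- the loop body: reset the accumulator on a match, otherwise append the token
def pvStep (target : String) (acc : List String) (tok : String) : List String :=
  if PySem.Str.lower tok = target then [] else acc ++ [tok]

def get_long_form_candidate_alt (tokens : List String) (end_pos : Int) (short_form : String) : List String :=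
  let target := PySem.Str.lower short_form
  (PySem.List.slice tokens (some (max (end_pos - 10) 0)) (some end_pos)).foldl (pvStep target) []

-- ===== PRECONDITION & SPEC =====
def Spec_get_long_form_candidate (tokens : List String) (end_pos : Int) (short_form : String) (out : List String) : Prop := out = get_long_form_candidate_alt tokens end_pos short_form
instance (tokens : List String) (end_pos : Int) (short_form : String) (out : List String) : Decidable (Spec_get_long_form_candidate tokens end_pos short_form out) := by unfold Spec_get_long_form_candidate; infer_instance

-- ===== CLAIM (what is proved, stated in full; the proofs are below) =====
def Claim_equal_get_long_form_candidate : Prop := ∀ (tokens : List String) (end_pos : Int) (short_form : String), Dom_get_long_form_candidate tokens end_pos short_form → Spec_get_long_form_candidate tokens end_pos short_form (get_long_form_candidate tokens end_pos short_form)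

-- ===== LEMMAS AND PROOFS =====

-- if no element matches, the fold just appends the whole list to the accumulator
lemma pvFold_no_match (t : String) :
    ∀ (w : List String) (acc : List String),
      (∀ x ∈ w, PySem.Str.lower x ≠ t) → w.foldl (pvStep t) acc = acc ++ w := by
  intro w
  induction w with
  | nil => intro acc _; simp
  | cons x xs ih =>
    intro acc h
    have hx : PySem.Str.lower x ≠ t := h x (by simp)
    have hxs : ∀ y ∈ xs, PySem.Str.lower y ≠ t := fun y hy => h y (by simp [hy])
    simp only [List.foldl_cons, pvStep, if_neg hx]
    rw [ih _ hxs]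
    simp

-- if j0 is the last matching index, the fold returns w.drop (j0+1) from any accumulator
lemma pvFold_last (t : String) :
    ∀ (w : List String) (j0 : Nat) (hj0 : j0 < w.length),
      PySem.Str.lower w[j0] = t →
      (∀ j, (hj : j < w.length) → j0 < j → PySem.Str.lower w[j] ≠ t) →
      ∀ acc, w.foldl (pvStep t) acc = w.drop (j0 + 1) := by
  intro w
  induction w with
  | nil => intro j0 hj0; simp at hj0
  | cons x xs ih =>
    intro j0 hj0 hhit hafter acc
    cases j0 with
    | zero =>
      have hx : PySem.Str.lower x = t := hhit
      have hxs : ∀ y ∈ xs, PySem.Str.lower y ≠ t := by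
        intro y hy
        obtain ⟨j, hj, rfl⟩ := List.getElem_of_mem hy
        exact hafter (j + 1) (by simpa using Nat.succ_lt_succ hj) (by omega)
      simp only [List.foldl_cons, pvStep, if_pos hx]
      rw [pvFold_no_match t xs [] hxs]
      simp
    | succ k =>
      have hk : k < xs.length := by simpa using hj0
      have hhit' : PySem.Str.lower xs[k] = t := hhit
      have hafter' : ∀ j, (hj : j < xs.length) → k < j → PySem.Str.lower xs[j] ≠ t := by
        intro j hj hkj
        exact hafter (j + 1) (by simpa using Nat.succ_lt_succ hj) (by omega)
      simp only [List.foldl_cons]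
      rw [ih k hk hhit' hafter' _]
      simp

-- the core equality, stated on an arbitrary window
lemma pvBody_eq (w : List String) (t : String) :
    (if t ∈ w.map PySem.Str.lower then
      match PySem.List.index? (w.map PySem.Str.lower).reverse t with
      | some k => PySem.List.slice w (some (((w.map PySem.Str.lower).length : Int) - (k : Int))) none
      | none => w
     else w) = w.foldl (pvStep t) [] := by
  by_cases hmem : t ∈ w.map PySem.Str.lower
  · have hmemrev : t ∈ (w.map PySem.Str.lower).reverse := by simpa using hmem
    obtain ⟨k, hk⟩ := Option.isSome_iff_exists.1
      ((PySem.List.index?_isSome_iff _ _).2 hmemrev)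
    obtain ⟨hklt, hkval, hkmin⟩ := PySem.List.getElem_of_index?_eq_some hk
    have hlen : (w.map PySem.Str.lower).length = w.length := by simp
    have hkw : k < w.length := by simpa using hklt
    set j0 := w.length - 1 - k with hj0def
    have hj0 : j0 < w.length := by omega
    have hrevj0 : ∀ j, (hj : j < w.length) →
        ((w.map PySem.Str.lower).reverse)[j]'(by simp; omega) = PySem.Str.lower (w[w.length - 1 - j]'(by omega)) := by
      intro j hj
      rw [List.getElem_reverse]
      simp [hlen]
    have hhit : PySem.Str.lower w[j0] = t := by
      have := hrevj0 k hkw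
      rw [this] at hkval
      exact hkval
    have hafter : ∀ j, (hj : j < w.length) → j0 < j → PySem.Str.lower w[j] ≠ t := by
      intro j hj hgt
      have hjk : w.length - 1 - j < k := by omega
      have := hkmin (w.length - 1 - j) (by omega)
      rw [hrevj0 (w.length - 1 - j) (by omega)] at this
      have hidx : w.length - 1 - (w.length - 1 - j) = j := by omega
      simpa [hidx] using this
    have hfold := pvFold_last t w j0 hj0 hhit hafter []
    have hslice : PySem.List.slice w (some (((w.map PySem.Str.lower).length : Int) - (k : Int))) none
        = w.drop (j0 + 1) := by
      rw [hlen]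
      have hnn : (0 : Int) ≤ (w.length : Int) - (k : Int) := by omega
      rw [PySem.List.slice_from w hnn]
      congr 1
      omega
    simp only [hmem, if_true, hk]
    rw [hslice, hfold]
  · have hno : ∀ x ∈ w, PySem.Str.lower x ≠ t := by
      intro x hx heq
      exact hmem (heq ▸ List.mem_map_of_mem (l := w) (f := PySem.Str.lower) hx)
    rw [pvFold_no_match t w [] hno]
    simp [hmem]

-- ===== VERDICT (by name: the statement is the Claim_ definition above) =====
theorem get_long_form_candidate_spec : Claim_equal_get_long_form_candidate := by
  intro tokens end_pos short_form _
  unfold Spec_get_long_form_candidate get_long_form_candidate get_long_form_candidate_alt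
  exact pvBody_eq _ _
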